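-- pv_equiv track=rewrite | github.com/Alekseev53/System-analysis-and-decision-making | task1/task.py | edges_to_adjacency_matrix
-- ===== SOURCE A (Python) =====
-- def edges_to_adjacency_matrix(edges):
--     nodes = set()
--     for edge in edges:
--         nodes.update(edge)
--     nodes = sorted(nodes)
--     node_index = {node: index for index, node in enumerate(nodes)}
--
--     size = len(nodes)
--     matrix = [[0] * size for _ in range(size)]
--
--     for edge in edges:
--         start, end = edge
--         matrix[node_index[start]][node_index[end]] = 1
--
--     return matrix
-- ===== SOURCE B (Python) =====
-- def edges_to_adjacency_matrix(edges):
--     # Group edges by source node, then emit each row by a two-pointer merge of the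
--     # sorted node list against the sorted successor list (no node->index dict).
--     succ = {}
--     for s, e in edges:
--         succ.setdefault(s, set()).add(e)
--     nodes = sorted({x for edge in edges for x in edge})
--     matrix = []
--     for u in nodes:
--         targets = sorted(succ.get(u, ()))
--         row = []
--         k = 0
--         for v in nodes:
--             if k < len(targets) and targets[k] == v:
--                 row.append(1)
--                 k += 1
--             else:
--                 row.append(0)
--         matrix.append(row)
--     return matrix
-- ===== Notes on version B (the rewrite author's own statement) =====
-- stated objective: alternative
-- what changed: B never builds a node->index dictionary or writes into a preallocated matrix: it groups edges into per-source successor sets, sorts each successor list, and emits every row by a two-pointer merge of the sorted node list against the sorted successor list.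
import Mathlib
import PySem

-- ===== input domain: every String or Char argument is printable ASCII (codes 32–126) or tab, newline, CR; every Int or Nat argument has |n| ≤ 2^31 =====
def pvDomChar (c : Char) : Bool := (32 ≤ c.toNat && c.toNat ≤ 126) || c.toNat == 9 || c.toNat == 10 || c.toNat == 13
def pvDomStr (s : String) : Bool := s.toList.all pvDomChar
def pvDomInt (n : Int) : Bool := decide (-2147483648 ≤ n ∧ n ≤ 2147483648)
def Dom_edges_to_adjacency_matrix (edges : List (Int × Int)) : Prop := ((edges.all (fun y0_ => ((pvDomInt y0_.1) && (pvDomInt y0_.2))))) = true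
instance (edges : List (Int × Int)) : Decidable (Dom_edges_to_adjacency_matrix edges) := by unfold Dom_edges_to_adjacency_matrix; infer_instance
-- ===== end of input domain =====

-- B drops A's node->index dictionary and indexed matrix writes: it groups edges into
-- per-source successor sets and emits each row by a two-pointer merge of the sorted
-- node list against the sorted successor list (objective: alternative).

-- ===== PORT A =====
def edges_to_adjacency_matrix (edges : List (Int × Int)) : List (List Int) :=
  -- nodes = set(); for edge in edges: nodes.update(edge)
  let nodesSet : PySem.Set Int :=
    edges.foldl (fun s e => PySem.Set.update s [e.1, e.2]) PySem.Set.empty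
  -- nodes = sorted(nodes)
  let nodes := PySem.List.sorted nodesSet (fun x => x) false
  -- node_index = {node: index for index, node in enumerate(nodes)}
  let nodeIndex : PySem.Dict Int Int :=
    (PySem.List.enumerate nodes 0).foldl (fun d p => d.insert p.2 p.1) PySem.Dict.empty
  let size := nodes.length
  -- matrix = [[0] * size for _ in range(size)]
  let matrix : List (List Int) := (List.range size).map (fun _ => List.replicate size (0 : Int))
  -- for edge in edges: matrix[node_index[start]][node_index[end]] = 1
  -- (node_index[…] is always a present key, so getD's default is never used)
  edges.foldl (fun m e =>
    let i := nodeIndex.getD e.1 0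
    let j := nodeIndex.getD e.2 0
    PySem.List.pySetD m i (PySem.List.pySetD (PySem.List.pyGetD m i []) j 1)) matrix

-- ===== PORT B =====
def edges_to_adjacency_matrix_alt (edges : List (Int × Int)) : List (List Int) :=
  -- succ = {}; for s, e in edges: succ.setdefault(s, set()).add(e)
  let succ : PySem.Dict Int (PySem.Set Int) :=
    edges.foldl (fun d p => d.modify p.1 PySem.Set.empty (fun s => PySem.Set.add s p.2))
      PySem.Dict.empty
  -- nodes = sorted({x for edge in edges for x in edge})
  let nodes := PySem.List.sorted (PySem.Set.ofList (edges.flatMap (fun e => [e.1, e.2]))) (fun x => x) false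
  -- matrix = []; for u in nodes: … ; matrix.append(row)
  nodes.foldl (fun matrix u =>
    -- targets = sorted(succ.get(u, ()))
    let targets := PySem.List.sorted (succ.getD u PySem.Set.empty) (fun x => x) false
    -- row = []; k = 0; for v in nodes: two-pointer merge step
    let row := (nodes.foldl (fun acc v =>
      if acc.2 < (targets.length : Int) ∧ PySem.List.pyGetD targets acc.2 0 = v
      then (acc.1 ++ [(1 : Int)], acc.2 + 1)
      else (acc.1 ++ [(0 : Int)], acc.2)) (([] : List Int), (0 : Int))).1
    matrix ++ [row]) []

-- ===== PRECONDITION & SPEC =====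
def Spec_edges_to_adjacency_matrix (edges : List (Int × Int)) (out : List (List Int)) : Prop := out = edges_to_adjacency_matrix_alt edges
instance (edges : List (Int × Int)) (out : List (List Int)) : Decidable (Spec_edges_to_adjacency_matrix edges out) := by unfold Spec_edges_to_adjacency_matrix; infer_instance

-- ===== CLAIM (what is proved, stated in full; the proofs are below) =====
def Claim_equal_edges_to_adjacency_matrix : Prop := ∀ (edges : List (Int × Int)), Dom_edges_to_adjacency_matrix edges → Spec_edges_to_adjacency_matrix edges (edges_to_adjacency_matrix edges)

-- ===== LEMMAS AND PROOFS =====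

-- A's node-gathering loop is the set of the flattened edge list.
theorem pvSetA_eq (edges : List (Int × Int)) :
    edges.foldl (fun s e => PySem.Set.update s [e.1, e.2]) PySem.Set.empty
      = PySem.Set.ofList (edges.flatMap (fun e => [e.1, e.2])) := by
  have h : ∀ (l : List (Int × Int)) (s : PySem.Set Int),
      l.foldl (fun s e => PySem.Set.update s [e.1, e.2]) s
        = PySem.Set.update s (l.flatMap (fun e => [e.1, e.2])) := by
    intro l
    induction l with
    | nil => intro s; simp [PySem.Set.update]
    | cons e es ih =>
      intro s
      simp only [List.foldl_cons, List.flatMap_cons, ih, PySem.Set.update_append]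
  rw [h]; simp [PySem.Set.empty, PySem.Set.update_nil_left]

-- A's single write matrix[i][j] = 1, as Python executes it
def pvW (m : List (List Int)) (p : Int × Int) : List (List Int) :=
  PySem.List.pySetD m p.1 (PySem.List.pySetD (PySem.List.pyGetD m p.1 []) p.2 1)

-- cell access used by the loop invariant
def pvCell (m : List (List Int)) (i j : Nat) : Int := (m.getD i []).getD j 0

theorem pvW_eq (m : List (List Int)) (n : Nat) (hl : m.length = n) (p : Int × Int)
    (hp : 0 ≤ p.1 ∧ p.1 < (n : Int) ∧ 0 ≤ p.2 ∧ p.2 < (n : Int)) :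
    pvW m p = m.set p.1.toNat ((m[p.1.toNat]'(by omega)).set p.2.toNat 1) := by
  obtain ⟨h1, h2, h3, h4⟩ := hp
  unfold pvW
  rw [PySem.List.pyGetD_eq_getElem _ _ h1 (by omega),
      PySem.List.pySetD_of_nonneg _ _ h3, PySem.List.pySetD_of_nonneg _ _ h1]

theorem pvW_length (m : List (List Int)) (p : Int × Int) : (pvW m p).length = m.length := by
  simp [pvW, PySem.List.length_pySetD]

theorem pvW_rows (m : List (List Int)) (n : Nat) (hl : m.length = n)
    (hr : ∀ row ∈ m, row.length = n) (p : Int × Int)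
    (hp : 0 ≤ p.1 ∧ p.1 < (n : Int) ∧ 0 ≤ p.2 ∧ p.2 < (n : Int)) :
    ∀ row ∈ pvW m p, row.length = n := by
  rw [pvW_eq m n hl p hp]
  intro row h
  rcases List.mem_or_eq_of_mem_set h with h2 | h2
  · exact hr row h2
  · subst h2; rw [List.length_set]; exact hr _ (List.getElem_mem _)

theorem pvCell_W (m : List (List Int)) (n : Nat) (hl : m.length = n)
    (hr : ∀ row ∈ m, row.length = n) (p : Int × Int)
    (hp : 0 ≤ p.1 ∧ p.1 < (n : Int) ∧ 0 ≤ p.2 ∧ p.2 < (n : Int)) (i j : Nat) :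
    pvCell (pvW m p) i j = if ((i : Int), (j : Int)) = p then 1 else pvCell m i j := by
  obtain ⟨h1, h2, h3, h4⟩ := hp
  have ha : p.1.toNat < m.length := by omega
  rw [pvW_eq m n hl p ⟨h1, h2, h3, h4⟩]
  unfold pvCell
  simp only [List.getD_eq_getElem?_getD, List.getElem?_set]
  by_cases hi : p.1.toNat = i
  · subst hi
    simp only [ite_true, if_pos ha, Option.getD_some, List.getElem?_set]
    have hrow : (m[p.1.toNat]'ha).length = n := hr _ (List.getElem_mem _)
    by_cases hj : p.2.toNat = j
    · subst hj
      rw [if_pos rfl, if_pos (by omega),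
          if_pos (show ((p.1.toNat : Int), (p.2.toNat : Int)) = p from by
            obtain ⟨a, b⟩ := p; simp_all)]
      simp
    · rw [if_neg hj,
          if_neg (by intro h; apply hj; have := congrArg Prod.snd h; simp at this; omega)]
      simp [List.getElem?_eq_getElem ha]
  · rw [if_neg hi,
        if_neg (by intro h; apply hi; have := congrArg Prod.fst h; simp at this; omega)]

theorem pvFold_length (ps : List (Int × Int)) :
    ∀ (m : List (List Int)), (ps.foldl pvW m).length = m.length := by
  induction ps with
  | nil => intro m; rfl
  | cons p ps ih => intro m; simp only [List.foldl_cons]; rw [ih, pvW_length]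

theorem pvFold_cell (ps : List (Int × Int)) (n : Nat) :
    ∀ (m : List (List Int)), m.length = n → (∀ row ∈ m, row.length = n) →
    (∀ p ∈ ps, 0 ≤ p.1 ∧ p.1 < (n : Int) ∧ 0 ≤ p.2 ∧ p.2 < (n : Int)) →
    ∀ (i j : Nat),
      pvCell (ps.foldl pvW m) i j
        = if ((i : Int), (j : Int)) ∈ ps then 1 else pvCell m i j := by
  induction ps with
  | nil => intro m _ _ _ i j; simp
  | cons p ps ih =>
    intro m hl hr hb i j
    have hp := hb p (List.mem_cons_self ..)
    have h1 : (pvW m p).length = n := by rw [pvW_length, hl]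
    have h2 := pvW_rows m n hl hr p hp
    have hb' : ∀ q ∈ ps, 0 ≤ q.1 ∧ q.1 < (n : Int) ∧ 0 ≤ q.2 ∧ q.2 < (n : Int) :=
      fun q hq => hb q (List.mem_cons_of_mem _ hq)
    simp only [List.foldl_cons]
    rw [ih (pvW m p) h1 h2 hb' i j, pvCell_W m n hl hr p hp i j]
    by_cases hmem : ((i : Int), (j : Int)) ∈ ps
    · simp [hmem, List.mem_cons]
    · by_cases heq : ((i : Int), (j : Int)) = p <;> simp [hmem, heq, List.mem_cons]

theorem pvFold_rows (ps : List (Int × Int)) (n : Nat) :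
    ∀ (m : List (List Int)), m.length = n → (∀ row ∈ m, row.length = n) →
    (∀ p ∈ ps, 0 ≤ p.1 ∧ p.1 < (n : Int) ∧ 0 ≤ p.2 ∧ p.2 < (n : Int)) →
    ∀ row ∈ ps.foldl pvW m, row.length = n := by
  induction ps with
  | nil => intro m _ h _; exact h
  | cons p ps ih =>
    intro m hl hr hb
    simp only [List.foldl_cons]
    exact ih (pvW m p) (by rw [pvW_length, hl]) (pvW_rows m n hl hr p (hb p (List.mem_cons_self ..)))
      (fun q hq => hb q (List.mem_cons_of_mem _ hq))

-- the index dict sends the k-th node of the (Nodup) node list to k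
theorem pvIdx_getElem (nodes : List Int) (hnd : nodes.Nodup) (k : Nat) (hk : k < nodes.length) :
    ((PySem.List.enumerate nodes 0).foldl (fun d p => d.insert p.2 p.1) PySem.Dict.empty).getD nodes[k] 0 = (k : Int) := by
  have hit := PySem.Dict.items_foldl_insert_fresh (PySem.List.enumerate nodes 0)
      (fun p => p.2) (fun p => p.1) PySem.Dict.empty
      (fun a _ => PySem.Dict.contains_empty _) ?nd
  case nd => rw [PySem.List.map_snd_enumerate]; exact hnd
  have hmem : (nodes[k], (k : Int)) ∈
      ((PySem.List.enumerate nodes 0).foldl (fun d p => d.insert p.2 p.1) PySem.Dict.empty).items := by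
    rw [hit]
    simp only [PySem.Dict.empty, List.nil_append, List.mem_map]
    refine ⟨((k : Int), nodes[k]), ?_, rfl⟩
    rw [PySem.List.mem_enumerate_iff]
    exact ⟨k, hk, by simp⟩
  have hkeys : ((PySem.List.enumerate nodes 0).foldl (fun d p => d.insert p.2 p.1) PySem.Dict.empty).keys.Nodup := by
    simp only [PySem.Dict.keys]
    rw [hit]
    simpa [PySem.Dict.empty, Function.comp_def, PySem.List.map_snd_enumerate] using hnd
  exact PySem.Dict.getD_of_mem_items _ hmem hkeys 0

-- membership in B's per-source successor sets: exactly the edges seen so far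
theorem pvMemSucc (l : List (Int × Int)) :
    ∀ (d : PySem.Dict Int (PySem.Set Int)) (u v : Int),
      (v ∈ (l.foldl (fun d p => d.modify p.1 PySem.Set.empty (fun s => PySem.Set.add s p.2)) d).getD u PySem.Set.empty)
        ↔ v ∈ d.getD u PySem.Set.empty ∨ (u, v) ∈ l := by
  induction l with
  | nil => intro d u v; simp
  | cons p ps ih =>
    intro d u v
    simp only [List.foldl_cons]
    rw [ih]
    rw [PySem.Dict.getD_modify]
    by_cases hu : u = p.1
    · subst hu
      rw [if_pos rfl, PySem.Set.mem_add]
      constructor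
      · rintro (⟨h | h⟩ | h)
        · exact Or.inl h
        · exact Or.inr (by rw [h, Prod.mk.eta]; exact List.mem_cons_self ..)
        · exact Or.inr (List.mem_cons_of_mem _ h)
      · rintro (h | h)
        · exact Or.inl (Or.inl h)
        · rcases List.mem_cons.mp h with h | h
          · exact Or.inl (Or.inr (congrArg Prod.snd h))
          · exact Or.inr h
    · rw [if_neg hu]
      constructor
      · rintro (h | h)
        · exact Or.inl h
        · exact Or.inr (List.mem_cons_of_mem _ h)
      · rintro (h | h)
        · exact Or.inl h
        · rcases List.mem_cons.mp h with h2 | h2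
          · exact absurd (congrArg Prod.fst h2) hu
          · exact Or.inr h2
  -- (the congruence point: modify = Python's setdefault(s, set()).add(e) on lookups)

-- every stored successor set stays duplicate-free
theorem pvNodupSucc (l : List (Int × Int)) :
    ∀ (d : PySem.Dict Int (PySem.Set Int)),
      (∀ u : Int, (d.getD u PySem.Set.empty).Nodup) →
      ∀ u : Int, ((l.foldl (fun d p => d.modify p.1 PySem.Set.empty (fun s => PySem.Set.add s p.2)) d).getD u PySem.Set.empty).Nodup := by
  induction l with
  | nil => intro d h u; exact h u
  | cons p ps ih =>
    intro d h u
    simp only [List.foldl_cons]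
    apply ih
    intro w
    rw [PySem.Dict.getD_modify]
    by_cases hw : w = p.1
    · rw [if_pos hw]; exact PySem.Set.nodup_add _ _ (h p.1)
    · rw [if_neg hw]; exact h w

-- sorting a duplicate-free list gives a strictly increasing list
theorem pvSortedStrict (s : List Int) (hnd : s.Nodup) :
    (PySem.List.sorted s (fun x => x) false).Pairwise (· < ·) := by
  have h1 : (PySem.List.sorted s (fun x => x) false).Pairwise (· ≤ ·) :=
    PySem.List.sorted_pairwise s (fun x => x)
  have h2 : (PySem.List.sorted s (fun x => x) false).Nodup :=
    (PySem.List.sorted_perm s (fun x => x) false).nodup_iff.mpr hnd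
  exact (h1.and h2).imp (fun h => lt_of_le_of_ne h.1 h.2)

-- the two-pointer merge marks exactly the members of ts among ns
theorem pvMerge (ts : List Int) (hts : ts.Pairwise (· < ·)) :
    ∀ (ns : List Int), ns.Pairwise (· < ·) → ∀ (k : Nat) (row0 : List Int),
      (∀ t ∈ ts.drop k, t ∈ ns) →
      (ns.foldl (fun acc v =>
        if acc.2 < (ts.length : Int) ∧ PySem.List.pyGetD ts acc.2 0 = v
        then (acc.1 ++ [(1 : Int)], acc.2 + 1)
        else (acc.1 ++ [(0 : Int)], acc.2)) (row0, (k : Int))).1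
        = row0 ++ ns.map (fun v => if v ∈ ts.drop k then (1 : Int) else 0) := by
  intro ns
  induction ns with
  | nil => intro _ k row0 _; simp
  | cons v rest ih =>
    intro hns k row0 hsub
    have hv := (List.pairwise_cons.mp hns).1
    have hrest := (List.pairwise_cons.mp hns).2
    simp only [List.foldl_cons, List.map_cons]
    by_cases hk : k < ts.length
    · have hdrop : ts.drop k = ts[k] :: ts.drop (k + 1) := List.drop_eq_getElem_cons hk
      have hget : PySem.List.pyGetD ts (k : Int) 0 = ts[k] := by
        rw [PySem.List.pyGetD_natCast]; exact List.getD_eq_getElem ts 0 hk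
      have htail : ∀ t ∈ ts.drop (k + 1), ts[k] < t := by
        have hpd : (ts.drop k).Pairwise (· < ·) := hts.drop
        rw [hdrop] at hpd
        exact (List.pairwise_cons.mp hpd).1
      by_cases hv2 : ts[k] = v
      · rw [if_pos ⟨by exact_mod_cast hk, by rw [hget, hv2]⟩]
        have hcast : ((k : Int) + 1) = ((k + 1 : Nat) : Int) := by push_cast; ring
        rw [hcast, ih hrest (k + 1) (row0 ++ [1]) ?sub]
        case sub =>
          intro t ht
          have htk : ts[k] < t := htail t ht
          have : t ∈ ts.drop k := by rw [hdrop]; exact List.mem_cons_of_mem _ ht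
          rcases List.mem_cons.mp (hsub t this) with h | h
          · omega
          · exact h
        rw [if_pos (by rw [hdrop, hv2]; exact List.mem_cons_self ..)]
        rw [List.append_assoc, List.singleton_append]
        congr 1
        congr 1
        apply List.map_congr_left
        intro w hw
        have hvw : v < w := hv w hw
        by_cases hmem : w ∈ ts.drop (k + 1)
        · rw [if_pos hmem, if_pos (by rw [hdrop]; exact List.mem_cons_of_mem _ hmem)]
        · rw [if_neg hmem, if_neg (by
            rw [hdrop]; intro hc
            rcases List.mem_cons.mp hc with h | h
            · omega
            · exact hmem h)]
      · have hvnot : v ∉ ts.drop k := by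
          rw [hdrop]
          intro hc
          rcases List.mem_cons.mp hc with h | h
          · exact hv2 h.symm
          · -- v ∈ drop (k+1) would force ts[k] < v, but ts[k] ∈ ns means v < ts[k]
            have h1 : ts[k] < v := htail v h
            have h2 : ts[k] ∈ v :: rest := hsub ts[k] (by rw [hdrop]; exact List.mem_cons_self ..)
            rcases List.mem_cons.mp h2 with h3 | h3
            · omega
            · have := hv _ h3; omega
        rw [if_neg (by
          intro hc
          exact hv2 (by rw [← hget]; exact hc.2))]
        rw [ih hrest k (row0 ++ [0]) ?sub2]
        case sub2 =>
          intro t ht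
          rcases List.mem_cons.mp (hsub t ht) with h | h
          · exact absurd (h ▸ ht) hvnot
          · exact h
        rw [if_neg hvnot, List.append_assoc, List.singleton_append]
    · have hnil : ts.drop k = [] := List.drop_of_length_le (by omega)
      rw [if_neg (by rintro ⟨h, _⟩; exact hk (by exact_mod_cast h))]
      rw [ih hrest k (row0 ++ [0]) (by rw [hnil]; intro t ht; cases ht)]
      rw [hnil]
      simp

theorem pvMain (edges : List (Int × Int)) :
    edges_to_adjacency_matrix edges = edges_to_adjacency_matrix_alt edges := by
  simp only [edges_to_adjacency_matrix, edges_to_adjacency_matrix_alt]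
  rw [pvSetA_eq]
  set nodes := PySem.List.sorted (PySem.Set.ofList (edges.flatMap (fun e => [e.1, e.2]))) (fun x => x) false with hnodes
  set dIdx := (PySem.List.enumerate nodes 0).foldl (fun d p => d.insert p.2 p.1) PySem.Dict.empty with hdIdx
  set succ := edges.foldl (fun d p => d.modify p.1 PySem.Set.empty (fun s => PySem.Set.add s p.2)) PySem.Dict.empty with hsucc
  set n := nodes.length with hn
  set M := nodes.map (fun u => nodes.map (fun v => if (u, v) ∈ edges then (1 : Int) else 0)) with hM
  have hnd : nodes.Nodup := by
    rw [hnodes]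
    exact (PySem.List.sorted_perm _ _ _).nodup_iff.mpr (PySem.Set.nodup_ofList _)
  have hmemNodes : ∀ e ∈ edges, e.1 ∈ nodes ∧ e.2 ∈ nodes := by
    intro e he
    constructor <;>
      (rw [hnodes, PySem.List.mem_sorted, PySem.Set.mem_ofList];
       exact List.mem_flatMap.mpr ⟨e, he, by simp⟩)
  -- ===== A equals the canonical matrix M =====
  have hA : (edges.foldl (fun m e =>
      PySem.List.pySetD m (dIdx.getD e.1 0)
        (PySem.List.pySetD (PySem.List.pyGetD m (dIdx.getD e.1 0) []) (dIdx.getD e.2 0) 1))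
      ((List.range n).map (fun _ => List.replicate n (0 : Int)))) = M := by
    set f : Int × Int → Int × Int := fun e => (dIdx.getD e.1 0, dIdx.getD e.2 0) with hf
    set writes := edges.map f with hwrites
    set m0 := (List.range n).map (fun _ => List.replicate n (0 : Int)) with hm0
    have hb : ∀ p ∈ writes, 0 ≤ p.1 ∧ p.1 < (n : Int) ∧ 0 ≤ p.2 ∧ p.2 < (n : Int) := by
      intro p hp
      rw [hwrites, List.mem_map] at hp
      obtain ⟨e, he, rfl⟩ := hp
      obtain ⟨k1, hk1, he1⟩ := List.getElem_of_mem (hmemNodes e he).1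
      obtain ⟨k2, hk2, he2⟩ := List.getElem_of_mem (hmemNodes e he).2
      have h1 := pvIdx_getElem nodes hnd k1 hk1
      have h2 := pvIdx_getElem nodes hnd k2 hk2
      rw [he1] at h1; rw [he2] at h2
      rw [← hdIdx] at h1 h2
      simp only [hf, h1, h2]
      exact ⟨Int.natCast_nonneg _, by exact_mod_cast hk1, Int.natCast_nonneg _, by exact_mod_cast hk2⟩
    -- membership of an index pair in the write list ↔ the node pair is an edge
    have hiff : ∀ (i j : Nat) (hi : i < nodes.length) (hj : j < nodes.length),
        (((i : Int), (j : Int)) ∈ writes ↔ (nodes[i], nodes[j]) ∈ edges) := by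
      intro i j hi hj
      constructor
      · intro h
        rw [hwrites, List.mem_map] at h
        obtain ⟨e, he, heq⟩ := h
        obtain ⟨k1, hk1, he1⟩ := List.getElem_of_mem (hmemNodes e he).1
        obtain ⟨k2, hk2, he2⟩ := List.getElem_of_mem (hmemNodes e he).2
        have h1 := pvIdx_getElem nodes hnd k1 hk1
        have h2 := pvIdx_getElem nodes hnd k2 hk2
        rw [he1] at h1; rw [he2] at h2
        rw [← hdIdx] at h1 h2
        simp only [hf, h1, h2, Prod.mk.injEq] at heq
        have hk1i : k1 = i := by exact_mod_cast heq.1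
        have hk2j : k2 = j := by exact_mod_cast heq.2
        subst hk1i; subst hk2j
        rw [he1, he2]
        exact (show ((e.1, e.2) : Int × Int) = e from rfl) ▸ he
      · intro h
        rw [hwrites, List.mem_map]
        refine ⟨(nodes[i], nodes[j]), h, ?_⟩
        have h1 := pvIdx_getElem nodes hnd i hi
        have h2 := pvIdx_getElem nodes hnd j hj
        rw [← hdIdx] at h1 h2
        simp only [hf, h1, h2]
    have hfold : (edges.foldl (fun m e =>
        PySem.List.pySetD m (dIdx.getD e.1 0)
          (PySem.List.pySetD (PySem.List.pyGetD m (dIdx.getD e.1 0) []) (dIdx.getD e.2 0) 1)) m0)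
        = writes.foldl pvW m0 := by
      rw [hwrites, List.foldl_map]
      rfl
    rw [hfold]
    have hm0l : m0.length = n := by simp [hm0]
    have hm0r : ∀ row ∈ m0, row.length = n := by
      intro row hr; rw [hm0] at hr; simp only [List.mem_map] at hr
      obtain ⟨_, _, rfl⟩ := hr; simp
    have hlenA : (writes.foldl pvW m0).length = n := by rw [pvFold_length, hm0l]
    apply List.ext_getElem
    · simp [hlenA, hM, hn]
    intro i hi1 hi2
    have hin : i < n := by rw [hlenA] at hi1; exact hi1
    have hrowA : (writes.foldl pvW m0)[i].length = n :=
      pvFold_rows writes n m0 hm0l hm0r hb _ (List.getElem_mem _)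
    apply List.ext_getElem
    · simp [hrowA, hM, hn]
    intro j hj1 hj2
    have hjn : j < n := by rw [hrowA] at hj1; exact hj1
    have hcell : pvCell (writes.foldl pvW m0) i j = (writes.foldl pvW m0)[i][j] := by
      unfold pvCell
      rw [List.getD_eq_getElem _ _ hi1, List.getD_eq_getElem _ _ hj1]
    rw [← hcell, pvFold_cell writes n m0 hm0l hm0r hb i j]
    have hc0 : pvCell m0 i j = 0 := by
      simp [pvCell, hm0, List.getD_eq_getElem?_getD, hin, hjn]
    simp only [hM, List.getElem_map]
    rw [hc0]
    by_cases hmem : (nodes[i]'(by rw [← hn]; omega), nodes[j]'(by rw [← hn]; omega)) ∈ edges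
    · rw [if_pos ((hiff i j hin hjn).mpr hmem), if_pos hmem]
    · rw [if_neg (fun hc => hmem ((hiff i j hin hjn).mp hc)), if_neg hmem]
  rw [hA]
  -- ===== B equals the canonical matrix M =====
  rw [PySem.List.foldl_append_singleton_eq_map]
  rw [hM]
  apply List.map_congr_left
  intro u _
  set ts := PySem.List.sorted (succ.getD u PySem.Set.empty) (fun x => x) false with hts
  have hmemts : ∀ v : Int, v ∈ ts ↔ (u, v) ∈ edges := by
    intro v
    rw [hts, PySem.List.mem_sorted, hsucc, pvMemSucc]
    simp [PySem.Dict.getD_empty, PySem.Set.empty]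
  have htsStrict : ts.Pairwise (· < ·) := by
    rw [hts]
    exact pvSortedStrict _ (pvNodupSucc edges PySem.Dict.empty
      (by intro w; simp [PySem.Dict.getD_empty, PySem.Set.empty]) u)
  have hnodesStrict : nodes.Pairwise (· < ·) := by
    rw [hnodes]
    exact PySem.List.sorted_ofList_pairwise_lt _
  have hsub : ∀ t ∈ ts.drop 0, t ∈ nodes := by
    intro t ht
    rw [List.drop_zero] at ht
    exact ((hmemNodes (u, t) ((hmemts t).mp ht)).2)
  have := pvMerge ts htsStrict nodes hnodesStrict 0 [] hsub
  rw [show ((0 : Nat) : Int) = (0 : Int) from rfl] at this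
  rw [this]
  rw [List.drop_zero, List.nil_append]
  apply List.map_congr_left
  intro v _
  by_cases hmem : v ∈ ts
  · rw [if_pos hmem, if_pos ((hmemts v).mp hmem)]
  · rw [if_neg hmem, if_neg (fun hc => hmem ((hmemts v).mpr hc))]

-- ===== VERDICT (by name: the statement is the Claim_ definition above) =====
theorem edges_to_adjacency_matrix_spec : Claim_equal_edges_to_adjacency_matrix := by
  intro edges _
  exact pvMain edges
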